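-- pv_equiv track=rewrite | github.com/lawson-gilles-cyber/cyber-project-14-ioc-detection-system | core/detector.py | detect_threats
-- ===== SOURCE A (Python) =====
-- def detect_threats(logs, malicious_ips, suspicious_files):
--     alerts = []
--
--     for log in logs:
--         log = log.strip()
--
--         # Check for malicious IPs
--         for ip in malicious_ips:
--             if ip in log:
--                 alerts.append(f"[IOC ALERT] Malicious IP detected: {ip}")
--
--         # Check for suspicious files
--         for file in suspicious_files:
--             if file in log:
--                 alerts.append(f"[IOC ALERT] Suspicious file accessed: {file}")
--
--     return alerts
-- ===== SOURCE B (Python) =====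
-- def detect_threats(logs, malicious_ips, suspicious_files):
--     # Pattern-major traversal: build one (pattern, message) table with the alert
--     # strings precomputed, fill per-log buckets pattern by pattern, then flatten
--     # the buckets in log order.
--     table = [(ip, f"[IOC ALERT] Malicious IP detected: {ip}") for ip in malicious_ips] \
--           + [(f, f"[IOC ALERT] Suspicious file accessed: {f}") for f in suspicious_files]
--     pairs = [(log.strip(), []) for log in logs]
--     for pat, msg in table:
--         for stripped, bucket in pairs:
--             if pat in stripped:
--                 bucket.append(msg)
--     return [msg for _, bucket in pairs for msg in bucket]
-- ===== Notes on version B (the rewrite author's own statement) =====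
-- stated objective: alternative
-- what changed: B transposes the traversal: it precomputes one unified (pattern, alert-message) table, fills per-log buckets pattern-major (pattern outer loop, logs inner) instead of A's log-major nested scans with per-match f-string formatting, then flattens the buckets in log order; equality needs a proof that the traversal order does not matter.
import Mathlib
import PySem

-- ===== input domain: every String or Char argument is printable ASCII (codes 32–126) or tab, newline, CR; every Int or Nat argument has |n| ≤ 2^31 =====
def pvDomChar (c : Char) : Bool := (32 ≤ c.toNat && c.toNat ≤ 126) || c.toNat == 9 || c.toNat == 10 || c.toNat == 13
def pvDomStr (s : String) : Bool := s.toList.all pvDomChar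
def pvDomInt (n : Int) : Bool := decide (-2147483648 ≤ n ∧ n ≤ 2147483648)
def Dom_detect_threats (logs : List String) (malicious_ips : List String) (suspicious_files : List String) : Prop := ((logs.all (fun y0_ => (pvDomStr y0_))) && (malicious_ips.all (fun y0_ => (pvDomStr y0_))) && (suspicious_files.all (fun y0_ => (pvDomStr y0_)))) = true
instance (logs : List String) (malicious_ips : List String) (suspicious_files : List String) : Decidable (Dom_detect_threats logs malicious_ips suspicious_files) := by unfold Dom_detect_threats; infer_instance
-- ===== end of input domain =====

-- B replaces A's log-major nested scans with a pattern-major fill of per-log buckets from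
-- one precomputed (pattern, alert-message) table (alternative traversal, same asymptotic cost).
-- ===== PORT A =====
-- Port of A: log-major nested scans, appending an alert per match.
def detect_threats (logs : List String) (malicious_ips : List String) (suspicious_files : List String) : List String :=
  logs.foldl (fun alerts log =>
    let log := PySem.Str.strip log
    let alerts := malicious_ips.foldl (fun a ip =>
      if PySem.Str.isIn ip log then a ++ ["[IOC ALERT] Malicious IP detected: " ++ ip] else a) alerts
    suspicious_files.foldl (fun a file =>
      if PySem.Str.isIn file log then a ++ ["[IOC ALERT] Suspicious file accessed: " ++ file] else a) alerts) []

-- ===== PORT B =====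
-- B: pattern-major fill of per-log buckets from one precomputed (pattern, message) table,
-- flattened in log order (alternative traversal; same asymptotic cost).
def detect_threats_alt (logs : List String) (malicious_ips : List String) (suspicious_files : List String) : List String :=
  let table :=
    malicious_ips.map (fun ip => (ip, "[IOC ALERT] Malicious IP detected: " ++ ip))
      ++ suspicious_files.map (fun f => (f, "[IOC ALERT] Suspicious file accessed: " ++ f))
  let pairs := logs.map (fun log => (PySem.Str.strip log, ([] : List String)))
  let pairs := table.foldl (fun ps pm =>
    ps.map (fun sb => if PySem.Str.isIn pm.1 sb.1 then (sb.1, sb.2 ++ [pm.2]) else sb)) pairs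
  pairs.flatMap (fun sb => sb.2)

-- ===== PRECONDITION & SPEC =====
def Spec_detect_threats (logs : List String) (malicious_ips : List String) (suspicious_files : List String) (out : List String) : Prop := out = detect_threats_alt logs malicious_ips suspicious_files
instance (logs : List String) (malicious_ips : List String) (suspicious_files : List String) (out : List String) : Decidable (Spec_detect_threats logs malicious_ips suspicious_files out) := by unfold Spec_detect_threats; infer_instance

-- ===== CLAIM (what is proved, stated in full; the proofs are below) =====
def Claim_equal_detect_threats : Prop := ∀ (logs : List String) (malicious_ips : List String) (suspicious_files : List String), Dom_detect_threats logs malicious_ips suspicious_files → Spec_detect_threats logs malicious_ips suspicious_files (detect_threats logs malicious_ips suspicious_files)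

-- ===== LEMMAS AND PROOFS =====

-- B invariant: after folding the whole table, each bucket holds the messages of the
-- table entries whose pattern occurs in that (stripped) log, in table order.
lemma buckets_foldl (table : List (String × String)) (ps : List (String × List String)) :
    table.foldl (fun ps pm =>
        ps.map (fun sb => if PySem.Str.isIn pm.1 sb.1 then (sb.1, sb.2 ++ [pm.2]) else sb)) ps
      = ps.map (fun sb =>
          (sb.1, sb.2 ++ (table.filter (fun pm => PySem.Str.isIn pm.1 sb.1)).map Prod.snd)) := by
  induction table generalizing ps with
  | nil => simp
  | cons pm rest ih =>
    rw [List.foldl_cons, ih, List.map_map]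
    apply List.map_congr_left
    intro sb _
    simp only [Function.comp, List.filter_cons]
    by_cases h : PySem.Chars.isIn pm.1.toList sb.1.toList = true
    · simp [PySem.Str.isIn, h]
    · simp [PySem.Str.isIn, h]

-- A as a flatMap over logs of the per-log matches (in A's ips-then-files order).
lemma detect_threats_acc (logs malicious_ips suspicious_files : List String) :
    ∀ acc : List String,
      logs.foldl (fun alerts log =>
        let log := PySem.Str.strip log
        let alerts := malicious_ips.foldl (fun a ip =>
          if PySem.Str.isIn ip log then a ++ ["[IOC ALERT] Malicious IP detected: " ++ ip] else a) alerts
        suspicious_files.foldl (fun a file =>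
          if PySem.Str.isIn file log then a ++ ["[IOC ALERT] Suspicious file accessed: " ++ file] else a) alerts) acc
      = acc ++ logs.flatMap (fun log =>
          (malicious_ips.filter (fun ip => PySem.Str.isIn ip (PySem.Str.strip log))).map
            (fun ip => "[IOC ALERT] Malicious IP detected: " ++ ip)
          ++ (suspicious_files.filter (fun file => PySem.Str.isIn file (PySem.Str.strip log))).map
            (fun file => "[IOC ALERT] Suspicious file accessed: " ++ file)) := by
  induction logs with
  | nil => simp
  | cons log rest ih =>
    intro acc
    rw [List.foldl_cons, ih]
    simp only [PySem.List.foldl_append_if, List.flatMap_cons, List.append_assoc]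


-- ===== VERDICT (by name: the statement is the Claim_ definition above) =====
theorem detect_threats_spec : Claim_equal_detect_threats := by
  intro logs malicious_ips suspicious_files _
  unfold Spec_detect_threats
  simp only [detect_threats, detect_threats_alt]
  rw [detect_threats_acc, buckets_foldl, List.map_map, List.nil_append]
  rw [List.flatMap_map]
  congr 1
  funext log
  simp [List.filter_append, List.filter_map, Function.comp_def, PySem.Str.isIn]
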